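-- pv_equiv track=rewrite | github.com/cpldcpu/GlowPoly | solver/poly_solver.py | is_solution_alternating_only
-- ===== SOURCE A (Python) =====
-- def is_solution_alternating_only(chosen_paths):
--     """
--     Check if a solution has all alternating vertices (each vertex is both anode and cathode).
--     Returns True if all vertices used in paths are alternating, False otherwise.
--     """
--     from collections import defaultdict
--     vertex_roles = defaultdict(set)  # vertex -> set of roles ('start', 'end')
--
--     # Analyze each path to determine vertex roles
--     for path in chosen_paths:
--         if len(path) >= 2:
--             start_vertex = path[0]
--             end_vertex = path[-1]
--             vertex_roles[start_vertex].add('start')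
--             vertex_roles[end_vertex].add('end')
--
--     # Check if all vertices are alternating (have both 'start' and 'end' roles)
--     for vertex, roles in vertex_roles.items():
--         if roles != {'start', 'end'}:
--             return False  # Found a vertex that is not alternating
--
--     return True
-- ===== SOURCE B (Python) =====
-- def is_solution_alternating_only(chosen_paths):
--     """
--     Check if a solution has all alternating vertices (each vertex is both anode and cathode).
--     Returns True if all vertices used in paths are alternating, False otherwise.
--     """
--     starts = {p[0] for p in chosen_paths if len(p) >= 2}
--     ends = {p[-1] for p in chosen_paths if len(p) >= 2}
--     return starts == ends
-- ===== Notes on version B (the rewrite author's own statement) =====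
-- stated objective: simpler
-- what changed: Replaces the per-vertex role dictionary and the validation loop with early return by two set comprehensions (start vertices, end vertices) and a single set equality, since every endpoint having both roles is equivalent to the start set equalling the end set.
import Mathlib
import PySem

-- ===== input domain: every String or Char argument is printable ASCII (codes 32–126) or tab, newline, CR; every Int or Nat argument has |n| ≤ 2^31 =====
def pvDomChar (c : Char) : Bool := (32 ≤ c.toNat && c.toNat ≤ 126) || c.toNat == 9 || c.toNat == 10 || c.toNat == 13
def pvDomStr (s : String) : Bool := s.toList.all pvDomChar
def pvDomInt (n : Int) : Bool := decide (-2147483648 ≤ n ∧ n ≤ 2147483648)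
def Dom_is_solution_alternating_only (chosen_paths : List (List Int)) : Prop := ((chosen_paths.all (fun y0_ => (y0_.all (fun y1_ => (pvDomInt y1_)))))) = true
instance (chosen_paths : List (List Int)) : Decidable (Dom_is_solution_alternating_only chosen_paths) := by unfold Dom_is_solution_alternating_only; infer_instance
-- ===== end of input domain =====

-- B replaces A's per-vertex role dictionary and validation loop with two set
-- comprehensions (start/end vertices) and one set equality (objective: simpler).

-- ===== PORT A =====
-- {'start', 'end'}
def pvTarget : PySem.Set String := PySem.Set.ofList ["start", "end"]

-- the role-accumulating dict: defaultdict(set); d[v].add(r) = modify v empty (add · r)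
-- path[0] / path[-1] are ported with pyGetD (total form): under the guard len(path) >= 2
-- both indices are in range, so this is exact.
def pvRolesFold (chosen_paths : List (List Int)) : PySem.Dict Int (PySem.Set String) :=
  chosen_paths.foldl (fun d path =>
    if 2 ≤ path.length then
      let start_vertex := PySem.List.pyGetD path 0 0
      let end_vertex := PySem.List.pyGetD path (-1) 0
      let d := d.modify start_vertex PySem.Set.empty (fun s => PySem.Set.add s "start")
      d.modify end_vertex PySem.Set.empty (fun s => PySem.Set.add s "end")
    else d) PySem.Dict.empty

-- the checking loop over items, with early return on a non-alternating vertex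
def pvCheck : List (Int × PySem.Set String) → Bool
  | [] => true
  | (_, roles) :: rest => if ¬ (PySem.Set.equal roles pvTarget = true) then false else pvCheck rest

def is_solution_alternating_only (chosen_paths : List (List Int)) : Bool :=
  pvCheck (pvRolesFold chosen_paths).items

-- ===== PORT B =====
def is_solution_alternating_only_alt (chosen_paths : List (List Int)) : Bool :=
  let starts := PySem.Set.ofList
    ((chosen_paths.filter (fun p => 2 ≤ p.length)).map (fun p => PySem.List.pyGetD p 0 0))
  let ends := PySem.Set.ofList
    ((chosen_paths.filter (fun p => 2 ≤ p.length)).map (fun p => PySem.List.pyGetD p (-1) 0))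
  PySem.Set.equal starts ends

-- ===== PRECONDITION & SPEC =====
def Spec_is_solution_alternating_only (chosen_paths : List (List Int)) (out : Bool) : Prop := out = is_solution_alternating_only_alt chosen_paths
instance (chosen_paths : List (List Int)) (out : Bool) : Decidable (Spec_is_solution_alternating_only chosen_paths out) := by unfold Spec_is_solution_alternating_only; infer_instance

-- ===== CLAIM (what is proved, stated in full; the proofs are below) =====
def Claim_equal_is_solution_alternating_only : Prop := ∀ (chosen_paths : List (List Int)), Dom_is_solution_alternating_only chosen_paths → Spec_is_solution_alternating_only chosen_paths (is_solution_alternating_only chosen_paths)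

-- ===== LEMMAS AND PROOFS =====

-- the start / end vertex lists of the qualifying paths
def pvS (l : List (List Int)) : List Int :=
  (l.filter (fun p => 2 ≤ p.length)).map (fun p => PySem.List.pyGetD p 0 0)
def pvE (l : List (List Int)) : List Int :=
  (l.filter (fun p => 2 ≤ p.length)).map (fun p => PySem.List.pyGetD p (-1) 0)

theorem pvS_cons (p : List Int) (l : List (List Int)) :
    pvS (p :: l) = if 2 ≤ p.length then PySem.List.pyGetD p 0 0 :: pvS l else pvS l := by
  simp only [pvS, List.filter_cons]
  split_ifs with h <;> simp_all

theorem pvE_cons (p : List Int) (l : List (List Int)) :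
    pvE (p :: l) = if 2 ≤ p.length then PySem.List.pyGetD p (-1) 0 :: pvE l else pvE l := by
  simp only [pvE, List.filter_cons]
  split_ifs with h <;> simp_all

-- one fold step as used in pvRolesFold
def pvStep (d : PySem.Dict Int (PySem.Set String)) (path : List Int) :
    PySem.Dict Int (PySem.Set String) :=
  if 2 ≤ path.length then
    ((d.modify (PySem.List.pyGetD path 0 0) PySem.Set.empty (fun s => PySem.Set.add s "start")).modify
      (PySem.List.pyGetD path (-1) 0) PySem.Set.empty (fun s => PySem.Set.add s "end"))
  else d

theorem pvRolesFold_eq (l : List (List Int)) :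
    pvRolesFold l = l.foldl pvStep PySem.Dict.empty := by
  rfl

theorem pv_mem_getD_modify_add (d : PySem.Dict Int (PySem.Set String)) (k v : Int)
    (r x : String) :
    x ∈ (d.modify k PySem.Set.empty (fun s => PySem.Set.add s r)).getD v PySem.Set.empty ↔
      x ∈ d.getD v PySem.Set.empty ∨ (x = r ∧ v = k) := by
  rw [PySem.Dict.getD_modify]
  split_ifs with h
  · subst h
    simp only [PySem.Set.mem_add]
    tauto
  · simp [h]

theorem pv_nodup_keys_modify (d : PySem.Dict Int (PySem.Set String)) (k : Int)
    (f : PySem.Set String → PySem.Set String) (hnd : d.keys.Nodup) :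
    (d.modify k PySem.Set.empty f).keys.Nodup := by
  rw [PySem.Dict.keys_modify]
  exact PySem.Dict.nodup_keys_insert _ _ _ hnd

theorem pv_nodup_keys_step (d : PySem.Dict Int (PySem.Set String)) (p : List Int)
    (hnd : d.keys.Nodup) : (pvStep d p).keys.Nodup := by
  unfold pvStep
  split_ifs with h
  · exact pv_nodup_keys_modify _ _ _ (pv_nodup_keys_modify _ _ _ hnd)
  · exact hnd

theorem pv_nodup_keys_fold (l : List (List Int)) (d : PySem.Dict Int (PySem.Set String))
    (hnd : d.keys.Nodup) : (l.foldl pvStep d).keys.Nodup := by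
  induction l generalizing d with
  | nil => exact hnd
  | cons p l ih => exact ih _ (pv_nodup_keys_step d p hnd)

theorem pv_mem_getD_step (d : PySem.Dict Int (PySem.Set String)) (p : List Int)
    (v : Int) (x : String) :
    x ∈ (pvStep d p).getD v PySem.Set.empty ↔
      x ∈ d.getD v PySem.Set.empty ∨
        (2 ≤ p.length ∧ ((x = "start" ∧ v = PySem.List.pyGetD p 0 0) ∨
                          (x = "end" ∧ v = PySem.List.pyGetD p (-1) 0))) := by
  unfold pvStep
  split_ifs with h
  · rw [pv_mem_getD_modify_add, pv_mem_getD_modify_add]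
    tauto
  · tauto

-- membership in the accumulated role set, over the whole fold
theorem pv_mem_getD_fold (l : List (List Int)) (d : PySem.Dict Int (PySem.Set String))
    (v : Int) (x : String) :
    x ∈ (l.foldl pvStep d).getD v PySem.Set.empty ↔
      x ∈ d.getD v PySem.Set.empty ∨ (x = "start" ∧ v ∈ pvS l) ∨ (x = "end" ∧ v ∈ pvE l) := by
  induction l generalizing d with
  | nil => simp [pvS, pvE]
  | cons p l ih =>
    rw [List.foldl_cons, ih, pv_mem_getD_step, pvS_cons, pvE_cons]
    by_cases hp : 2 ≤ p.length
    · simp only [hp, if_pos, List.mem_cons, true_and]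
      tauto
    · simp only [hp, if_neg, false_and, not_false_iff]
      tauto

theorem pv_mem_keys_step (d : PySem.Dict Int (PySem.Set String)) (p : List Int) (v : Int) :
    v ∈ (pvStep d p).keys ↔
      v ∈ d.keys ∨ (2 ≤ p.length ∧
        (v = PySem.List.pyGetD p 0 0 ∨ v = PySem.List.pyGetD p (-1) 0)) := by
  unfold pvStep
  split_ifs with h
  · rw [PySem.Dict.keys_modify, PySem.Dict.mem_keys_insert, PySem.Dict.keys_modify,
      PySem.Dict.mem_keys_insert]
    tauto
  · tauto

-- membership in the keys of the accumulated dict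
theorem pv_mem_keys_fold (l : List (List Int)) (d : PySem.Dict Int (PySem.Set String))
    (v : Int) :
    v ∈ (l.foldl pvStep d).keys ↔ v ∈ d.keys ∨ v ∈ pvS l ∨ v ∈ pvE l := by
  induction l generalizing d with
  | nil => simp [pvS, pvE]
  | cons p l ih =>
    rw [List.foldl_cons, ih, pv_mem_keys_step, pvS_cons, pvE_cons]
    by_cases hp : 2 ≤ p.length
    · simp only [hp, if_pos, List.mem_cons, true_and]
      tauto
    · simp only [hp, if_neg, false_and, or_false, not_false_iff]

theorem pv_check_iff (l : List (Int × PySem.Set String)) :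
    pvCheck l = true ↔ ∀ p ∈ l, PySem.Set.equal p.2 pvTarget = true := by
  induction l with
  | nil => simp [pvCheck]
  | cons p l ih =>
    obtain ⟨k, r⟩ := p
    by_cases h : PySem.Set.equal r pvTarget = true
    · rw [show pvCheck ((k, r) :: l) = pvCheck l by simp [pvCheck, h], ih]
      constructor
      · intro hall q hq
        rcases List.mem_cons.mp hq with rfl | hq
        · exact h
        · exact hall q hq
      · intro hall q hq
        exact hall q (List.mem_cons_of_mem _ hq)
    · rw [show pvCheck ((k, r) :: l) = false by simp only [pvCheck]; exact if_pos h]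
      constructor
      · intro hfalse
        exact absurd hfalse (by simp)
      intro hall
      exfalso
      exact h (hall (k, r) (List.mem_cons_self ..))

-- A = true iff every used endpoint vertex is both a start and an end
theorem pvA_iff (l : List (List Int)) :
    is_solution_alternating_only l = true ↔
      ∀ v : Int, (v ∈ pvS l ∨ v ∈ pvE l) → (v ∈ pvS l ∧ v ∈ pvE l) := by
  unfold is_solution_alternating_only
  rw [pvRolesFold_eq, pv_check_iff]
  have hnd : (l.foldl pvStep PySem.Dict.empty).keys.Nodup :=
    pv_nodup_keys_fold l _ PySem.Dict.nodup_keys_empty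
  constructor
  · intro hall v hv
    have hk : v ∈ (l.foldl pvStep PySem.Dict.empty).keys := by
      rw [pv_mem_keys_fold]
      simp [hv]
    obtain ⟨r, hr⟩ : ∃ r, (l.foldl pvStep PySem.Dict.empty).get? v = some r := by
      cases hg : (l.foldl pvStep PySem.Dict.empty).get? v with
      | none =>
        exact absurd ((PySem.Dict.get?_eq_none_iff_not_mem_keys _ _).mp hg) (by simp [hk])
      | some r => exact ⟨r, rfl⟩
    have hmem := PySem.Dict.mem_items_of_get?_eq_some _ hr
    have heq := hall (v, r) hmem
    rw [PySem.Set.equal_iff] at heq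
    have hgetD : (l.foldl pvStep PySem.Dict.empty).getD v PySem.Set.empty = r :=
      PySem.Dict.getD_of_get?_eq_some _ _ hr
    constructor
    · have h1 : ("start" : String) ∈ r := by
        rw [heq "start"]; simp [pvTarget, PySem.Set.mem_ofList]
      have := (pv_mem_getD_fold l PySem.Dict.empty v "start").mp (by rw [hgetD]; exact h1)
      simpa using this
    · have h1 : ("end" : String) ∈ r := by
        rw [heq "end"]; simp [pvTarget, PySem.Set.mem_ofList]
      have := (pv_mem_getD_fold l PySem.Dict.empty v "end").mp (by rw [hgetD]; exact h1)
      simpa using this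
  · intro hall p hp
    obtain ⟨k, r⟩ := p
    have hget : (l.foldl pvStep PySem.Dict.empty).get? k = some r :=
      PySem.Dict.get?_of_mem_items _ hp hnd
    have hgetD : (l.foldl pvStep PySem.Dict.empty).getD k PySem.Set.empty = r :=
      PySem.Dict.getD_of_get?_eq_some _ _ hget
    have hk : k ∈ (l.foldl pvStep PySem.Dict.empty).keys :=
      PySem.Dict.mem_keys_of_mem_items _ hp
    have hkk : k ∈ pvS l ∨ k ∈ pvE l := by
      have := (pv_mem_keys_fold l PySem.Dict.empty k).mp hk
      simpa using this
    obtain ⟨hS, hE⟩ := hall k hkk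
    rw [PySem.Set.equal_iff]
    intro x
    have hx : x ∈ r ↔ (x = "start" ∧ k ∈ pvS l) ∨ (x = "end" ∧ k ∈ pvE l) := by
      rw [← hgetD, pv_mem_getD_fold]
      simp
    rw [hx]
    simp only [pvTarget, PySem.Set.mem_ofList, List.mem_cons, List.not_mem_nil, or_false]
    constructor
    · rintro (⟨h, _⟩ | ⟨h, _⟩) <;> simp [h]
    · rintro (h | h)
      · exact Or.inl ⟨h, hS⟩
      · exact Or.inr ⟨h, hE⟩

theorem pvB_iff (l : List (List Int)) :
    is_solution_alternating_only_alt l = true ↔ ∀ v : Int, v ∈ pvS l ↔ v ∈ pvE l := by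
  unfold is_solution_alternating_only_alt
  rw [PySem.Set.equal_iff]
  constructor
  · intro h v
    have := h v
    simpa [PySem.Set.mem_ofList, pvS, pvE] using this
  · intro h v
    have := h v
    simpa [PySem.Set.mem_ofList, pvS, pvE] using this

-- ===== VERDICT (by name: the statement is the Claim_ definition above) =====
theorem is_solution_alternating_only_spec : Claim_equal_is_solution_alternating_only := by
  intro l _
  unfold Spec_is_solution_alternating_only
  rw [Bool.eq_iff_iff, pvA_iff, pvB_iff]
  constructor
  · intro h v
    constructor
    · intro hv; exact (h v (Or.inl hv)).2
    · intro hv; exact (h v (Or.inr hv)).1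
  · intro h v hv
    rcases hv with hv | hv
    · exact ⟨hv, (h v).mp hv⟩
    · exact ⟨(h v).mpr hv, hv⟩
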